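-- pv_equiv track=rewrite | github.com/decryptedlayer/InfraSec | Report_Engine.py | header_score
-- ===== SOURCE A (Python) =====
-- def header_score(headP):
--     score = ''
--     num = len(headP)
--
--     scoreTable = {
--         '8':'A+',
--         '7':'A+',
--         '6':'A',
--         '5':'A',
--         '4':'B',
--         '3':'C',
--         '2':'D',
--         '1':'F',
--         '0':'F'
--         }
--
--
--     for item in scoreTable:
--         if str(item) == str(num):
--             score = scoreTable[item]
--         else:
--             pass
--
--     return score
-- ===== SOURCE B (Python) =====
-- def header_score(headP):
--     num = len(headP)
--     if num >= 9:
--         return ''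
--     if num >= 7:
--         return 'A+'
--     if num >= 5:
--         return 'A'
--     if num == 4:
--         return 'B'
--     if num == 3:
--         return 'C'
--     if num == 2:
--         return 'D'
--     return 'F'
-- ===== Notes on version B (the rewrite author's own statement) =====
-- stated objective: simpler
-- what changed: Replaces the dict build plus full key scan with str() comparisons by a direct threshold/equality comparison chain on len(headP), keeping '' for counts >= 9.
import Mathlib
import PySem

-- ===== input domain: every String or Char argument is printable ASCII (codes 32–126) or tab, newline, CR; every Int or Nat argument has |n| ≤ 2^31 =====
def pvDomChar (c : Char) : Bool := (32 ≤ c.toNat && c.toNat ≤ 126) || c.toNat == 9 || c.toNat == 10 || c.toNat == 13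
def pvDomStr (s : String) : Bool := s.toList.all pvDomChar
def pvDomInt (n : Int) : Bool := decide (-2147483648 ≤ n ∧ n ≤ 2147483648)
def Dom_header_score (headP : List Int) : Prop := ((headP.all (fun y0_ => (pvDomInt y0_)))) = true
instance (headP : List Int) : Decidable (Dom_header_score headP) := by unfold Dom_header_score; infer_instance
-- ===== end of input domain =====

-- B replaces A's dict-build-and-scan (string comparison against every key) by a direct
-- integer threshold chain on len(headP); objective: simpler.

-- ===== PORT A =====
-- the dict literal, in insertion order
def pvScoreTable : List (String × String) :=
  [("8","A+"),("7","A+"),("6","A"),("5","A"),("4","B"),("3","C"),("2","D"),("1","F"),("0","F")]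

-- for item in scoreTable: if str(item) == str(num): score = scoreTable[item]
-- (item iterates the keys; scoreTable[item] is that key's value; str of a str is itself)
def header_score (headP : List Int) : String :=
  let num : Int := headP.length
  pvScoreTable.foldl (fun score kv => if kv.1 = PySem.Int.toStr num then kv.2 else score) ""

-- ===== PORT B =====
def header_score_alt (headP : List Int) : String :=
  let num : Int := headP.length
  if num ≥ 9 then ""
  else if num ≥ 7 then "A+"
  else if num ≥ 5 then "A"
  else if num = 4 then "B"
  else if num = 3 then "C"
  else if num = 2 then "D"
  else "F"

-- ===== PRECONDITION & SPEC =====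
def Spec_header_score (headP : List Int) (out : String) : Prop := out = header_score_alt headP
instance (headP : List Int) (out : String) : Decidable (Spec_header_score headP out) := by unfold Spec_header_score; infer_instance

-- ===== CLAIM (what is proved, stated in full; the proofs are below) =====
def Claim_equal_header_score : Prop := ∀ (headP : List Int), Dom_header_score headP → Spec_header_score headP (header_score headP)

-- ===== LEMMAS AND PROOFS =====

-- toDigitsCore with positive fuel appends at least one character
lemma pv_toDigitsCore_len_ge (f : Nat) : ∀ (m : Nat) (l : List Char),
    l.length + 1 ≤ (Nat.toDigitsCore 10 (f+1) m l).length := by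
  induction f with
  | zero =>
    intro m l
    simp only [Nat.toDigitsCore]
    split <;> simp
  | succ f ih =>
    intro m l
    simp only [Nat.toDigitsCore]
    split
    · simp
    · exact le_trans (by simp) (ih (m / 10) (Nat.digitChar (m % 10) :: l))

-- a number ≥ 10 has at least two decimal digits
lemma pv_toDigits_two_le {n : Nat} (hn : 10 ≤ n) : 2 ≤ (Nat.toDigits 10 n).length := by
  have hdiv : n / 10 ≠ 0 := by omega
  obtain ⟨f, hf⟩ : ∃ f, n + 1 = f + 2 := ⟨n - 1, by omega⟩
  show 2 ≤ (Nat.toDigitsCore 10 (n + 1) n []).length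
  rw [hf]
  simp only [Nat.toDigitsCore]
  split_ifs with h1 h2
  · exact absurd h1 hdiv
  · simp
  · obtain ⟨g, rfl⟩ : ∃ g, f = g + 1 := ⟨f - 1, by omega⟩
    exact le_trans (by simp) (pv_toDigitsCore_len_ge g (n / 10 / 10)
      [Nat.digitChar (n / 10 % 10), Nat.digitChar (n % 10)])

-- for n ≥ 10, str(n) has at least two characters, hence differs from any one-char key
lemma pv_toStr_ne {n : Nat} (hn : 10 ≤ n) (s : String) (hs : s.toList.length = 1) :
    s ≠ PySem.Int.toStr (n : Int) := by
  intro h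
  have h2 : s.toList = (PySem.Int.toStr (n : Int)).toList := by rw [h]
  rw [PySem.Int.toList_toStr] at h2
  have hnonneg : ¬ ((n : Int) < 0) := by omega
  have hchars : PySem.Int.toChars (n : Int) = Nat.toDigits 10 n := by
    simp [PySem.Int.toChars, hnonneg]
  rw [hchars] at h2
  have := pv_toDigits_two_le hn
  rw [← h2, hs] at this
  omega

-- the scan returns its accumulator when no key matches
lemma pv_foldl_no_match (t : List (String × String)) (x : String) (acc : String)
    (h : ∀ kv ∈ t, kv.1 ≠ x) :
    t.foldl (fun score kv => if kv.1 = x then kv.2 else score) acc = acc := by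
  induction t generalizing acc with
  | nil => rfl
  | cons a t ih =>
    simp only [List.foldl, if_neg (h a (List.mem_cons_self ..))]
    exact ih acc (fun kv hkv => h kv (List.mem_cons_of_mem _ hkv))

-- main lemma: agreement for every input
lemma pv_agree (headP : List Int) : header_score headP = header_score_alt headP := by
  simp only [header_score, header_score_alt]
  by_cases hb : headP.length < 10
  · generalize hn : headP.length = n at hb ⊢
    interval_cases n <;> decide
  · push Not at hb
    rw [pv_foldl_no_match _ _ _ (by
      intro kv hkv
      fin_cases hkv <;> exact pv_toStr_ne hb _ (by decide))]
    rw [if_pos (by exact_mod_cast by omega : (9:Int) ≤ (headP.length : Int))]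

-- ===== VERDICT (by name: the statement is the Claim_ definition above) =====
theorem header_score_spec : Claim_equal_header_score := by
  intro headP _
  unfold Spec_header_score
  exact pv_agree headP
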